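-- pv_equiv track=rewrite | github.com/ARezaAbdi/Deep-Reinforcement-Learning-AlphaGo-Zero-for-LCS | DRL(AlphaGo Zero) for LCS.py | get_ub
-- ===== SOURCE A (Python) =====
-- def counting(state, alphabet):
--   i = 0
--   j = 0
--   while i < len(state):
--     if state[i] == alphabet:
--       j = j + 1
--     i = i + 1
--   return j
--
-- def get_ub(state, alphabet):
--   st = state
--   ub = 0
--   for j in range(len(alphabet)):
--     x = []
--     for k in range(len(state)):
--       x.append(counting(state[k], alphabet[j]))
--     temp_number = x[0]
--     for k in range(len(state)):
--       if x[k] < temp_number: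
--         temp_number = x[k]
--     ub = ub + temp_number
--   return int(ub)
-- ===== SOURCE B (Python) =====
-- def _freq(s):
--     f = {}
--     for ch in s:
--         f[ch] = f.get(ch, 0) + 1
--     return f
--
-- def get_ub(state, alphabet):
--     common = _freq(state[0])
--     for s in state[1:]:
--         f = _freq(s)
--         common = {ch: min(v, f.get(ch, 0)) for ch, v in common.items()}
--     return int(sum(common.get(ch, 0) for ch in alphabet))
-- ===== Notes on version B (the rewrite author's own statement) =====
-- stated objective: faster
-- what changed: Instead of rescanning every string once per alphabet symbol, B builds one frequency dict per string, folds them with an element-wise minimum, and sums one lookup per alphabet symbol.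
-- outside the precondition, e.g. on get_ub([], ''): A returns 0, B raises IndexError
import Mathlib
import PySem

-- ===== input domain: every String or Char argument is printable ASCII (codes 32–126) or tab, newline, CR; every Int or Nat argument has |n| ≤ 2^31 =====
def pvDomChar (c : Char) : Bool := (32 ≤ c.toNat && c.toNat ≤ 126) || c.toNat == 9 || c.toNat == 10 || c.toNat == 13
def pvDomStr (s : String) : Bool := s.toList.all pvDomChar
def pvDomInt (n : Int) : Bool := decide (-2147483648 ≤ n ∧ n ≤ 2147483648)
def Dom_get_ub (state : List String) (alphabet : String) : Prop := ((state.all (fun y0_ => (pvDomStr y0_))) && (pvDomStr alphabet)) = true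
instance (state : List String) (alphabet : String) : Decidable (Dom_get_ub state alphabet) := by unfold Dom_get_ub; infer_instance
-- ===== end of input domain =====

-- B replaces A's per-symbol rescans by one frequency dict per string folded with an
-- element-wise minimum, then one lookup per alphabet symbol (measured faster at size).


-- ===== PORT A =====
-- A's `counting` while-loop over the indices of the string, as a fold over its chars
def counting (s : String) (ch : Char) : Int :=
  s.toList.foldl (fun j c => if c = ch then j + 1 else j) 0

def get_ub (state : List String) (alphabet : String) : Int :=
  (PySem.List.pyRange 0 (PySem.Str.len alphabet) 1).foldl (fun ub j =>
    let x := (PySem.List.pyRange 0 (state.length : Int) 1).foldl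
      (fun x k => x ++ [counting (PySem.List.pyGetD state k "") (PySem.List.pyGetD alphabet.toList j ' ')]) []
    -- x[0] raises IndexError when state = [] (excluded by Pre_); pyGetD is exact inside Pre_
    let temp0 := PySem.List.pyGetD x 0 0
    let temp := (PySem.List.pyRange 0 (state.length : Int) 1).foldl
      (fun t k => if PySem.List.pyGetD x k 0 < t then PySem.List.pyGetD x k 0 else t) temp0
    ub + temp) 0

-- ===== PORT B =====
-- Source B's _freq: plain dict built by f[ch] = f.get(ch, 0) + 1
def pvFreq (s : String) : PySem.Dict Char Int :=
  s.toList.foldl (fun f ch => f.insert ch (f.getD ch 0 + 1)) PySem.Dict.empty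

-- Source B's dict comprehension {ch: min(v, f.get(ch, 0)) for ch, v in common.items()}
def pvStep (common f : PySem.Dict Char Int) : PySem.Dict Char Int :=
  common.items.foldl (fun acc kv => acc.insert kv.1 (min kv.2 (f.getD kv.1 0))) PySem.Dict.empty

def get_ub_alt (state : List String) (alphabet : String) : Int :=
  -- state[0] raises IndexError when state = [] (excluded by Pre_)
  let common := (PySem.List.slice state (some 1) none).foldl
    (fun common s => pvStep common (pvFreq s)) (pvFreq (PySem.List.pyGetD state 0 ""))
  (alphabet.toList.map (fun ch => common.getD ch 0)).sum

-- ===== PRECONDITION & SPEC =====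
-- Pre_ excludes the empty state list: there A raises IndexError (x[0]) for every nonempty
-- alphabet, and B raises IndexError (state[0]) always — so the lone returning corner
-- ([], "") (A returns 0, B raises) is excluded as well.
def Pre_get_ub (state : List String) (alphabet : String) : Prop := state ≠ []
instance (state : List String) (alphabet : String) : Decidable (Pre_get_ub state alphabet) := by unfold Pre_get_ub; infer_instance

def pvWitness_get_ub : List String × String := (["ab", "b"], "ab")

def Spec_get_ub (state : List String) (alphabet : String) (out : Int) : Prop := out = get_ub_alt state alphabet
instance (state : List String) (alphabet : String) (out : Int) : Decidable (Spec_get_ub state alphabet out) := by unfold Spec_get_ub; infer_instance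

-- ===== CLAIM (what is proved, stated in full; the proofs are below) =====
def Claim_equal_get_ub : Prop := ∀ (state : List String) (alphabet : String), Dom_get_ub state alphabet → Pre_get_ub state alphabet → Spec_get_ub state alphabet (get_ub state alphabet)

-- ===== LEMMAS AND PROOFS =====

-- the count a string contributes for one character
def pvCnt (ch : Char) (s : String) : Int := (s.toList.count ch : Int)

theorem counting_eq (s : String) (ch : Char) : counting s ch = pvCnt ch s := by
  unfold counting pvCnt
  rw [show (fun (j : Int) (c : Char) => if c = ch then j + 1 else j)
        = (fun (j : Int) (c : Char) => if (c == ch) then j + 1 else j) by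
      funext j c; simp]
  rw [PySem.List.foldl_count_if (fun c => c == ch) s.toList 0]
  simp [List.count]

theorem pvFreq_getD (s : String) (ch : Char) : (pvFreq s).getD ch 0 = pvCnt ch s := by
  unfold pvFreq pvCnt
  rw [PySem.Dict.getD_foldl_insert_add_one]
  simp [PySem.Dict.getD_empty]

theorem pvFreq_nodup (s : String) : (pvFreq s).keys.Nodup := by
  unfold pvFreq
  exact PySem.Dict.nodup_keys_foldl_insert _ _ _ (by simp [PySem.Dict.keys_empty])

theorem pvStep_items (common f : PySem.Dict Char Int) (hnd : common.keys.Nodup) :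
    (pvStep common f).items
      = common.items.map (fun kv => (kv.1, min kv.2 (f.getD kv.1 0))) := by
  unfold pvStep
  rw [PySem.Dict.items_foldl_insert_fresh common.items (fun kv => kv.1)
        (fun kv => min kv.2 (f.getD kv.1 0)) PySem.Dict.empty
        (fun a _ => by simp [PySem.Dict.contains_empty]) hnd]
  rfl

theorem pvStep_keys (common f : PySem.Dict Char Int) (hnd : common.keys.Nodup) :
    (pvStep common f).keys = common.keys := by
  have h := pvStep_items common f hnd
  show (pvStep common f).items.map (·.1) = common.items.map (·.1)
  rw [h, List.map_map]
  rfl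

theorem pvStep_getD (common f : PySem.Dict Char Int) (ch : Char)
    (hnd : common.keys.Nodup) (hf : 0 ≤ f.getD ch 0) :
    (pvStep common f).getD ch 0 = min (common.getD ch 0) (f.getD ch 0) := by
  have hitems := pvStep_items common f hnd
  have hkeys := pvStep_keys common f hnd
  by_cases hmem : ch ∈ common.keys
  · have hmem' : ch ∈ common.items.map (·.1) := hmem
    have hv : ∃ v, (ch, v) ∈ common.items := by
      rcases List.mem_map.mp hmem' with ⟨⟨k, v⟩, hkv, hfst⟩
      exact ⟨v, by simpa [show k = ch from hfst] using hkv⟩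
    rcases hv with ⟨v, hv⟩
    have h1 : common.getD ch 0 = v := PySem.Dict.getD_of_mem_items common hv hnd 0
    have h2 : (ch, min v (f.getD ch 0)) ∈ (pvStep common f).items := by
      rw [hitems]; exact List.mem_map.mpr ⟨(ch, v), hv, rfl⟩
    rw [PySem.Dict.getD_of_mem_items _ h2 (by rwa [hkeys]) 0, h1]
  · have h1 : common.getD ch 0 = 0 := PySem.Dict.getD_of_not_contains common 0
      (by rcases h : common.contains ch with _ | _
          · rfl
          · exact absurd ((PySem.Dict.contains_iff_mem_keys common ch).mp h) hmem)
    have h2 : (pvStep common f).getD ch 0 = 0 := PySem.Dict.getD_of_not_contains _ 0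
      (by rcases h : (pvStep common f).contains ch with _ | _
          · rfl
          · exact absurd (hkeys ▸ (PySem.Dict.contains_iff_mem_keys _ ch).mp h) hmem)
    rw [h1, h2]
    omega

-- the fold of pvStep computes, per character, the running minimum of the counts
theorem fold_step_getD (rest : List String) (d : PySem.Dict Char Int)
    (hnd : d.keys.Nodup) (ch : Char) :
    (rest.foldl (fun acc s => pvStep acc (pvFreq s)) d).getD ch 0
      = rest.foldl (fun m s => min m (pvCnt ch s)) (d.getD ch 0) := by
  induction rest generalizing d with
  | nil => rfl
  | cons s rest ih =>
    simp only [List.foldl_cons]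
    rw [ih _ (by rw [pvStep_keys _ _ hnd]; exact hnd),
        pvStep_getD _ _ _ hnd (by rw [pvFreq_getD]; unfold pvCnt; positivity),
        pvFreq_getD]

-- what A computes for one character of the alphabet, on a nonempty state
theorem perChar (s0 : String) (rest : List String) (ch : Char) :
    (let x := (PySem.List.pyRange 0 ((s0 :: rest).length : Int) 1).foldl
        (fun x k => x ++ [counting (PySem.List.pyGetD (s0 :: rest) k "") ch]) []
      let temp0 := PySem.List.pyGetD x 0 0
      (PySem.List.pyRange 0 ((s0 :: rest).length : Int) 1).foldl
        (fun t k => if PySem.List.pyGetD x k 0 < t then PySem.List.pyGetD x k 0 else t) temp0)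
      = rest.foldl (fun m s => min m (pvCnt ch s)) (pvCnt ch s0) := by
  have hx : (PySem.List.pyRange 0 ((s0 :: rest).length : Int) 1).foldl
      (fun x k => x ++ [counting (PySem.List.pyGetD (s0 :: rest) k "") ch]) []
      = (s0 :: rest).map (fun s => pvCnt ch s) := by
    rw [PySem.List.foldl_append_singleton_eq_map (fun k => counting (PySem.List.pyGetD (s0 :: rest) k "") ch)]
    rw [show (fun k => counting (PySem.List.pyGetD (s0 :: rest) k "") ch)
          = (fun s => counting s ch) ∘ (fun k => PySem.List.pyGetD (s0 :: rest) k "") from rfl,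
        ← List.map_map, PySem.List.map_pyGetD_pyRange_zero']
    simp [counting_eq]
  simp only [hx]
  have hlen : ((s0 :: rest).length : Int)
      = (((s0 :: rest).map (fun s => pvCnt ch s)).length : Int) := by simp
  rw [hlen, PySem.List.foldl_pyRange_zero_pyGetD' ((s0 :: rest).map (fun s => pvCnt ch s)) 0
        (fun t v => if v < t then v else t)]
  simp only [List.map_cons, PySem.List.pyGetD_zero_cons, List.foldl_cons, List.foldl_map]
  rw [show (if pvCnt ch s0 < pvCnt ch s0 then pvCnt ch s0 else pvCnt ch s0) = pvCnt ch s0 by simp]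
  refine PySem.List.foldl_congr_mem _ _ _ _ fun m s _ => ?_
  simp only [min_def]
  split_ifs <;> omega

theorem get_ub_eq (s0 : String) (rest : List String) (alphabet : String) :
    get_ub (s0 :: rest) alphabet
      = (alphabet.toList.map
          (fun ch => rest.foldl (fun m s => min m (pvCnt ch s)) (pvCnt ch s0))).sum := by
  unfold get_ub
  simp only [perChar]
  rw [show PySem.Str.len alphabet = (alphabet.toList.length : Int) by
        simp [PySem.Str.len_eq],
      PySem.List.foldl_pyRange_zero_pyGetD' alphabet.toList ' '
        (fun ub ch => ub + rest.foldl (fun m s => min m (pvCnt ch s)) (pvCnt ch s0)) 0,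
      PySem.List.foldl_add]
  simp

theorem get_ub_alt_eq (s0 : String) (rest : List String) (alphabet : String) :
    get_ub_alt (s0 :: rest) alphabet
      = (alphabet.toList.map
          (fun ch => rest.foldl (fun m s => min m (pvCnt ch s)) (pvCnt ch s0))).sum := by
  unfold get_ub_alt
  simp only [PySem.List.slice_from_one, List.tail_cons, PySem.List.pyGetD_zero_cons]
  refine congrArg List.sum (List.map_congr_left fun ch _ => ?_)
  rw [fold_step_getD rest (pvFreq s0) (pvFreq_nodup s0) ch, pvFreq_getD]

-- ===== VERDICT (by name: the statement is the Claim_ definition above) =====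
theorem get_ub_spec : Claim_equal_get_ub := by
  intro state alphabet _ hpre
  match state with
  | [] => exact absurd rfl hpre
  | s0 :: rest =>
    show get_ub (s0 :: rest) alphabet = get_ub_alt (s0 :: rest) alphabet
    rw [get_ub_eq, get_ub_alt_eq]
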